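-- pv_equiv track=rewrite | github.com/msbaek/git-log-doc | src/html_diff_renderer.py | _prepare_side_by_side_diff
-- ===== SOURCE A (Python) =====
-- def _prepare_side_by_side_diff(diff_content):
--     """Prepare diff content for side-by-side display"""
--     left_lines = []  # Original (deleted) content
--     right_lines = [] # New (added) content
--
--     i = 0
--     while i < len(diff_content):
--         line = diff_content[i]
--
--         if line['type'] == 'hunk':
--             # Add hunk header to both sides
--             left_lines.append(line)
--             right_lines.append(line)
--         elif line['type'] == 'delete':
--             # Collect consecutive delete lines
--             delete_block = []
--             while i < len(diff_content) and diff_content[i]['type'] == 'delete':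
--                 delete_block.append(diff_content[i])
--                 i += 1
--
--             # Check if followed by add lines
--             add_block = []
--             while i < len(diff_content) and diff_content[i]['type'] == 'add':
--                 add_block.append(diff_content[i])
--                 i += 1
--
--             # Pair them up
--             max_len = max(len(delete_block), len(add_block))
--             for j in range(max_len):
--                 if j < len(delete_block):
--                     left_lines.append(delete_block[j])
--                 else:
--                     left_lines.append({'type': 'empty', 'content': ''})
--
--                 if j < len(add_block):
--                     right_lines.append(add_block[j])
--                 else:
--                     right_lines.append({'type': 'empty', 'content': ''})
--
--             i -= 1  # Adjust because we've already processed adds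
--         elif line['type'] == 'add':
--             # Standalone add (no preceding delete)
--             left_lines.append({'type': 'empty', 'content': ''})
--             right_lines.append(line)
--         elif line['type'] == 'truncated':
--             # Handle truncated marker
--             left_lines.append(line)
--             right_lines.append(line)
--         else:
--             # Context lines appear on both sides
--             left_lines.append({'type': 'context', 'content': line.get('content', '')})
--             right_lines.append({'type': 'context', 'content': line.get('content', '')})
--
--         i += 1
--
--     return left_lines, right_lines
-- ===== SOURCE B (Python) =====
-- def _prepare_side_by_side_diff(diff_content):
--     """Prepare diff content for side-by-side display (group-then-pair)."""
--     # Phase 1: collapse diff_content into runs of consecutive same-type lines.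
--     groups = []
--     idx = 0
--     n = len(diff_content)
--     while idx < n:
--         t = diff_content[idx]['type']
--         j = idx
--         while j < n and diff_content[j]['type'] == t:
--             j += 1
--         groups.append((t, diff_content[idx:j]))
--         idx = j
--
--     # Phase 2: one pass over the groups with one-step lookahead.
--     left, right = [], []
--     k = 0
--     while k < len(groups):
--         t, g = groups[k]
--         if t == 'delete':
--             adds = []
--             if k + 1 < len(groups) and groups[k + 1][0] == 'add':
--                 adds = groups[k + 1][1]
--                 k += 1
--             m = max(len(g), len(adds))
--             left.extend(g + [{'type': 'empty', 'content': ''}] * (m - len(g)))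
--             right.extend(adds + [{'type': 'empty', 'content': ''}] * (m - len(adds)))
--         elif t == 'add':
--             left.extend({'type': 'empty', 'content': ''} for _ in g)
--             right.extend(g)
--         elif t in ('hunk', 'truncated'):
--             left.extend(g)
--             right.extend(g)
--         else:
--             left.extend({'type': 'context', 'content': l.get('content', '')} for l in g)
--             right.extend({'type': 'context', 'content': l.get('content', '')} for l in g)
--         k += 1
--     return left, right
-- ===== Notes on version B (the rewrite author's own statement) =====
-- stated objective: alternative
-- what changed: Replaced the single mutating-index while loop (with nested block-collecting whiles and the i -= 1 correction) by a two-phase pass: first collapse the input into runs of consecutive same-type lines, then traverse the run list with one-step lookahead, pairing a delete run with a following add run by padding the shorter side.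
import Mathlib
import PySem

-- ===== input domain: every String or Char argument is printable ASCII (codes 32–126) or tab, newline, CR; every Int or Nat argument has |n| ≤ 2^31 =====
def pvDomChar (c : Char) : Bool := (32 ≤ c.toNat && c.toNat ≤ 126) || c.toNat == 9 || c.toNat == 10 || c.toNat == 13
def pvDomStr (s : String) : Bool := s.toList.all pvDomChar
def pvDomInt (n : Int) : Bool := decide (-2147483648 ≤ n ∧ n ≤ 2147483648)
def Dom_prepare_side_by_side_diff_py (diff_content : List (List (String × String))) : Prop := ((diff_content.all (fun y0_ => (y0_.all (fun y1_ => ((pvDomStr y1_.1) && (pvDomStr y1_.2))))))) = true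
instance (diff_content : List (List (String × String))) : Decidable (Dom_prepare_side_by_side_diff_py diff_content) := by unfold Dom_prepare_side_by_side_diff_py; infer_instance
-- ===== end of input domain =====

-- B replaces A's single mutating-index loop by group-into-runs then a lookahead pass over the runs; equivalence proved on inputs where every line has a 'type' key (Python raises KeyError otherwise).

-- ===== PORT A =====
-- line['type'] / line.get('content',''): first-match dict lookup (Pre_ guarantees the 'type' key exists, so getD is exact)
def pvGet (l : List (String × String)) (k dflt : String) : String :=
  (PySem.Dict.mk l).getD k dflt

def pvTy (l : List (String × String)) : String := pvGet l "type" ""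

def pvEmpty : List (String × String) := [("type", "empty"), ("content", "")]

def pvCtx (l : List (String × String)) : List (String × String) :=
  [("type", "context"), ("content", pvGet l "content" "")]

-- A's 'for j in range(max_len)' pairing loop, step for step
def pvPairA : List (List (String × String)) → List (List (String × String)) →
    (List (List (String × String))) × (List (List (String × String)))
  | [], [] => ([], [])
  | d :: ds, [] => let r := pvPairA ds []; (d :: r.1, pvEmpty :: r.2)
  | [], a :: as => let r := pvPairA [] as; (pvEmpty :: r.1, a :: r.2)
  | d :: ds, a :: as => let r := pvPairA ds as; (d :: r.1, a :: r.2)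

-- A's outer while loop over the remaining suffix; the inner block-collecting whiles are takeWhile/dropWhile
def pvLoopA : List (List (String × String)) →
    (List (List (String × String))) × (List (List (String × String)))
  | [] => ([], [])
  | line :: rest =>
    if pvTy line = "hunk" then
      let r := pvLoopA rest
      (line :: r.1, line :: r.2)
    else if pvTy line = "delete" then
      let db := line :: rest.takeWhile (fun l => pvTy l == "delete")
      let r1 := rest.dropWhile (fun l => pvTy l == "delete")
      let ab := r1.takeWhile (fun l => pvTy l == "add")
      let r2 := r1.dropWhile (fun l => pvTy l == "add")
      let p := pvPairA db ab
      let r := pvLoopA r2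
      (p.1 ++ r.1, p.2 ++ r.2)
    else if pvTy line = "add" then
      let r := pvLoopA rest
      (pvEmpty :: r.1, line :: r.2)
    else if pvTy line = "truncated" then
      let r := pvLoopA rest
      (line :: r.1, line :: r.2)
    else
      let r := pvLoopA rest
      (pvCtx line :: r.1, pvCtx line :: r.2)
termination_by l => l.length
decreasing_by
  · simp
  · simp only [List.length_cons]
    have h1 := List.length_dropWhile_le (fun l => pvTy l == "add") (rest.dropWhile (fun l => pvTy l == "delete"))
    have h2 := List.length_dropWhile_le (fun l => pvTy l == "delete") rest
    omega
  · simp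
  · simp
  · simp

def prepare_side_by_side_diff_py (diff_content : List (List (String × String))) : (List (List (String × String))) × (List (List (String × String))) :=
  pvLoopA diff_content

-- ===== PORT B =====
-- Phase 1 of Source B: collapse into runs of consecutive same-type lines
def pvGroups : List (List (String × String)) → List (String × List (List (String × String)))
  | [] => []
  | l :: rest =>
    (pvTy l, l :: rest.takeWhile (fun x => pvTy x == pvTy l)) ::
      pvGroups (rest.dropWhile (fun x => pvTy x == pvTy l))
termination_by l => l.length
decreasing_by
  simp only [List.length_cons]
  have := List.length_dropWhile_le (fun x => pvTy x == pvTy l) rest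
  omega

-- Source B's 'block + [EMPTY] * (m - len(block))'
def pvPad (xs : List (List (String × String))) (m : Nat) : List (List (String × String)) :=
  xs ++ List.replicate (m - xs.length) pvEmpty

-- Phase 2 of Source B: lookahead pass over the runs
def pvProcB : List (String × List (List (String × String))) →
    (List (List (String × String))) × (List (List (String × String)))
  | [] => ([], [])
  | (t, g) :: gs =>
    if t = "delete" then
      let p : (List (List (String × String))) × List (String × List (List (String × String))) :=
        match gs with
        | (t2, g2) :: tl => if t2 = "add" then (g2, tl) else ([], gs)
        | [] => ([], gs)
      let m := max g.length p.1.length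
      let r := pvProcB p.2
      (pvPad g m ++ r.1, pvPad p.1 m ++ r.2)
    else if t = "add" then
      let r := pvProcB gs
      (g.map (fun _ => pvEmpty) ++ r.1, g ++ r.2)
    else if t = "hunk" || t = "truncated" then
      let r := pvProcB gs
      (g ++ r.1, g ++ r.2)
    else
      let r := pvProcB gs
      (g.map pvCtx ++ r.1, g.map pvCtx ++ r.2)
termination_by l => l.length
decreasing_by
  · cases gs with
    | nil => simp
    | cons h tl =>
      obtain ⟨t2, g2⟩ := h
      by_cases h2 : t2 = "add" <;> simp [h2]
  · simp
  · simp
  · simp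

def prepare_side_by_side_diff_py_alt (diff_content : List (List (String × String))) : (List (List (String × String))) × (List (List (String × String))) :=
  pvProcB (pvGroups diff_content)

-- ===== PRECONDITION & SPEC =====
-- Pre_ excludes exactly the inputs where some line has no 'type' key: Python A raises KeyError there.
def Pre_prepare_side_by_side_diff_py (diff_content : List (List (String × String))) : Prop :=
  ∀ l ∈ diff_content, (PySem.Dict.mk l).contains "type" = true
instance (diff_content : List (List (String × String))) : Decidable (Pre_prepare_side_by_side_diff_py diff_content) := by unfold Pre_prepare_side_by_side_diff_py; infer_instance

def pvWitness_prepare_side_by_side_diff_py : (List (List (String × String))) :=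
  [[("type", "hunk")], [("type", "delete"), ("content", "x")], [("type", "add"), ("content", "y")], [("type", "context"), ("content", "z")]]

def Spec_prepare_side_by_side_diff_py (diff_content : List (List (String × String))) (out : (List (List (String × String))) × (List (List (String × String)))) : Prop := out = prepare_side_by_side_diff_py_alt diff_content
instance (diff_content : List (List (String × String))) (out : (List (List (String × String))) × (List (List (String × String)))) : Decidable (Spec_prepare_side_by_side_diff_py diff_content out) := by unfold Spec_prepare_side_by_side_diff_py; infer_instance

-- ===== CLAIM (what is proved, stated in full; the proofs are below) =====
def Claim_equal_prepare_side_by_side_diff_py : Prop := ∀ (diff_content : List (List (String × String))), Dom_prepare_side_by_side_diff_py diff_content → Pre_prepare_side_by_side_diff_py diff_content → Spec_prepare_side_by_side_diff_py diff_content (prepare_side_by_side_diff_py diff_content)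

-- ===== LEMMAS AND PROOFS =====

-- the per-line left/right output of A's non-delete branches, parametrised by the line type
def pvOutL (t : String) (x : List (String × String)) : List (String × String) :=
  if t = "hunk" then x else if t = "add" then pvEmpty else if t = "truncated" then x else pvCtx x

def pvOutR (t : String) (x : List (String × String)) : List (String × String) :=
  if t = "hunk" then x else if t = "add" then x else if t = "truncated" then x else pvCtx x

-- A's pairing loop equals B's pad-both-sides
theorem pvPairA_eq_pad : ∀ (d a : List (List (String × String))),
    pvPairA d a = (pvPad d (max d.length a.length), pvPad a (max d.length a.length))
  | [], [] => by simp [pvPairA, pvPad]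
  | x :: xs, [] => by
      simp [pvPairA, pvPairA_eq_pad xs [], pvPad, List.replicate_succ]
  | [], y :: ys => by
      simp [pvPairA, pvPairA_eq_pad [] ys, pvPad, List.replicate_succ]
  | x :: xs, y :: ys => by
      simp [pvPairA, pvPairA_eq_pad xs ys, pvPad, Nat.succ_max_succ, Nat.succ_sub_succ]

-- A's loop maps a run of same-type non-delete lines elementwise and continues
theorem pvLoopA_run (t : String) (ht : t ≠ "delete") (tw zs : List (List (String × String)))
    (h : ∀ x ∈ tw, pvTy x = t) :
    pvLoopA (tw ++ zs) =
      (tw.map (pvOutL t) ++ (pvLoopA zs).1, tw.map (pvOutR t) ++ (pvLoopA zs).2) := by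
  induction tw with
  | nil => simp
  | cons x xs ih =>
    have hx : pvTy x = t := h x (by simp)
    have ih' := ih (fun y hy => h y (by simp [hy]))
    by_cases h1 : t = "hunk"
    · simp [pvLoopA, hx, h1, ih', pvOutL, pvOutR]
    · by_cases h2 : t = "add"
      · simp [pvLoopA, hx, h1, h2, ht, ih', pvOutL, pvOutR]
      · by_cases h3 : t = "truncated"
        · simp [pvLoopA, hx, h1, h2, h3, ht, ih', pvOutL, pvOutR]
        · simp [pvLoopA, hx, h1, h2, h3, ht, ih', pvOutL, pvOutR]

-- unfolding pvProcB on a non-delete head for an arbitrary tail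
theorem pvProcB_cons_nondelete (t : String) (g : List (List (String × String)))
    (gs : List (String × List (List (String × String)))) (ht : t ≠ "delete") :
    pvProcB ((t, g) :: gs) =
      (if t = "add" then
        (g.map (fun _ => pvEmpty) ++ (pvProcB gs).1, g ++ (pvProcB gs).2)
      else if t = "hunk" || t = "truncated" then
        (g ++ (pvProcB gs).1, g ++ (pvProcB gs).2)
      else
        (g.map pvCtx ++ (pvProcB gs).1, g.map pvCtx ++ (pvProcB gs).2)) := by
  cases gs with
  | nil => simp [pvProcB, ht]
  | cons p tl =>
    obtain ⟨t2, g2⟩ := p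
    simp [pvProcB, ht]

theorem pv_main : ∀ (n : Nat) (xs : List (List (String × String))), xs.length ≤ n →
    pvLoopA xs = pvProcB (pvGroups xs) := by
  intro n
  induction n with
  | zero =>
    intro xs h
    have : xs = [] := List.eq_nil_of_length_eq_zero (Nat.le_zero.mp h)
    subst this; simp [pvLoopA, pvGroups, pvProcB]
  | succ n ih =>
    intro xs h
    cases xs with
    | nil => simp [pvLoopA, pvGroups, pvProcB]
    | cons l rest =>
      have hrest : rest.length ≤ n := by simpa using h
      have hsplit : rest.takeWhile (fun x => pvTy x == pvTy l) ++
          rest.dropWhile (fun x => pvTy x == pvTy l) = rest :=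
        List.takeWhile_append_dropWhile
      have hdwlen : (rest.dropWhile (fun x => pvTy x == pvTy l)).length ≤ rest.length :=
        List.length_dropWhile_le _ _
      by_cases hdel : pvTy l = "delete"
      · -- delete run: A's delete branch vs B's delete group with lookahead
        simp only [pvLoopA, pvGroups, hdel]
        simp only [reduceIte, String.reduceEq]
        cases hdw : rest.dropWhile (fun x => pvTy x == "delete") with
        | nil =>
          simp [pvGroups, pvProcB, pvLoopA, pvPairA_eq_pad, hdw]
        | cons hd dw' =>
          have hhd : (pvTy hd == "delete") = false := by
            have hne : rest.dropWhile (fun x => pvTy x == "delete") ≠ [] := by simp [hdw]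
            have := List.head_dropWhile_not (fun x => pvTy x == "delete") hne
            simpa [hdw] using this
          have hdw'len : dw'.length + 1 ≤ rest.length := by
            have := List.length_dropWhile_le (fun x => pvTy x == "delete") rest
            rw [hdw] at this; simpa using this
          by_cases hadd : pvTy hd = "add"
          · -- next group is an add run: B pairs them; A's inner add-collecting while
            have haddt : (pvTy hd == "add") = true := by simp [hadd]
            simp only [pvGroups, hadd, hdw]
            have h2 : (dw'.dropWhile (fun x => pvTy x == "add")).length ≤ n := by
              have := List.length_dropWhile_le (fun x => pvTy x == "add") dw'
              omega
            simp [pvProcB, pvPairA_eq_pad, ih _ h2, List.takeWhile_cons, List.dropWhile_cons,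
              haddt, Nat.succ_max_succ]
          · -- next group is not add: A collects no adds, B pads with empties
            have haddb : (pvTy hd == "add") = false := by simp [hadd]
            simp only [pvGroups, hdw, haddb, List.takeWhile_cons, List.dropWhile_cons,
              Bool.false_eq_true, if_neg]
            have ihdw := ih (hd :: dw') (by simp; omega)
            simp only [pvGroups] at ihdw
            simp [pvProcB, pvPairA_eq_pad, hadd, ihdw]
      · -- non-delete run: elementwise on the whole run on both sides
        have hrun : ∀ x ∈ l :: rest.takeWhile (fun y => pvTy y == pvTy l), pvTy x = pvTy l := by
          intro x hx
          rcases List.mem_cons.mp hx with rfl | hx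
          · rfl
          · simpa using List.mem_takeWhile_imp hx
        have hA : pvLoopA (l :: rest) =
            ((l :: rest.takeWhile (fun y => pvTy y == pvTy l)).map (pvOutL (pvTy l)) ++
              (pvLoopA (rest.dropWhile (fun y => pvTy y == pvTy l))).1,
             (l :: rest.takeWhile (fun y => pvTy y == pvTy l)).map (pvOutR (pvTy l)) ++
              (pvLoopA (rest.dropWhile (fun y => pvTy y == pvTy l))).2) := by
          conv_lhs => rw [show l :: rest = (l :: rest.takeWhile (fun y => pvTy y == pvTy l)) ++
            rest.dropWhile (fun y => pvTy y == pvTy l) by simp [hsplit]]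
          exact pvLoopA_run (pvTy l) hdel _ _ hrun
        have ihdw := ih (rest.dropWhile (fun y => pvTy y == pvTy l)) (by omega)
        rw [hA, ihdw]
        simp only [pvGroups]
        rw [pvProcB_cons_nondelete _ _ _ hdel]
        by_cases h1 : pvTy l = "hunk"
        · have e1 : pvOutL "hunk" = id := by funext x; simp [pvOutL]
          have e2 : pvOutR "hunk" = id := by funext x; simp [pvOutR]
          simp [h1, e1, e2]
        · by_cases h2 : pvTy l = "add"
          · have e1 : pvOutL "add" = fun _ => pvEmpty := by funext x; simp [pvOutL]
            have e2 : pvOutR "add" = id := by funext x; simp [pvOutR]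
            simp [h1, h2, e1, e2]
          · by_cases h3 : pvTy l = "truncated"
            · have e1 : pvOutL "truncated" = id := by funext x; simp [pvOutL]
              have e2 : pvOutR "truncated" = id := by funext x; simp [pvOutR]
              simp [h1, h2, h3, e1, e2]
            · have e1 : pvOutL (pvTy l) = pvCtx := by funext x; simp [pvOutL, h1, h2, h3, hdel]
              have e2 : pvOutR (pvTy l) = pvCtx := by funext x; simp [pvOutR, h1, h2, h3, hdel]
              simp [h1, h2, h3, e1, e2]

-- ===== VERDICT (by name: the statement is the Claim_ definition above) =====
theorem prepare_side_by_side_diff_py_spec : Claim_equal_prepare_side_by_side_diff_py := by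
  intro d _ _
  unfold Spec_prepare_side_by_side_diff_py prepare_side_by_side_diff_py prepare_side_by_side_diff_py_alt
  exact pv_main d.length d le_rfl
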